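-- pv_equiv track=rewrite | github.com/Aasthaengg/IBMdataset | Python_codes/p03050/s492858141.py | divisor_dif_2_over
-- ===== SOURCE A (Python) =====
-- def divisor_dif_2_over(n):
--     if n == 1:
--         return []
--     res = []
--     i = 1
--     while i * i <= n:
--         if n % i == 0 and (n // i) - i >= 2:
--             res.append(n // i - 1)
--         i += 1
--     return res
-- ===== SOURCE B (Python) =====
-- def divisor_dif_2_over(n):
--     if n < 1:
--         return []
--     # prime factorization of n by trial division
--     m = n
--     factors = []
--     p = 2
--     while p * p <= m:
--         if m % p == 0:
--             e = 0
--             while m % p == 0: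
--                 m //= p
--                 e += 1
--             factors.append((p, e))
--         p += 1
--     if m > 1:
--         factors.append((m, 1))
--     # all divisors of n as products of prime powers
--     divs = {1}
--     for p, e in factors:
--         divs = {d * p ** k for d in divs for k in range(e + 1)}
--     # small divisors d in increasing order give the results in A's (decreasing) order
--     return [n // d - 1 for d in sorted(divs) if d * d <= n and n // d - d >= 2]
-- ===== Notes on version B (the rewrite author's own statement) =====
-- stated objective: alternative
-- what changed: B replaces A's single trial-division scan up to sqrt(n) by prime-factorizing n, generating the complete divisor set from the prime powers, and emitting n//d-1 for the small divisors d (d*d<=n, n//d-d>=2) taken in sorted order, which reproduces A's decreasing output order.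
import Mathlib
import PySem

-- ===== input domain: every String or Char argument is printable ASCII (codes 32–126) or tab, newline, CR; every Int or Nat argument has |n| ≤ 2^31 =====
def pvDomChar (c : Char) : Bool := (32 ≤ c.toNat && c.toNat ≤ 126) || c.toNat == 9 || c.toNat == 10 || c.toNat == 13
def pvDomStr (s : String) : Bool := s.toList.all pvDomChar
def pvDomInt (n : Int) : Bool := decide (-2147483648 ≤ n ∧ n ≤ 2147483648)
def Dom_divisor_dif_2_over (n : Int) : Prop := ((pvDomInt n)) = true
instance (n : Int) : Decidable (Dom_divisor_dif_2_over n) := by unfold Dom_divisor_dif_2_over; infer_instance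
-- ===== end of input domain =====

-- B prime-factorizes n by trial division, builds the set of all divisors from the prime powers,
-- and emits n//d-1 for the qualifying small divisors in sorted order (alternative algorithm, same asymptotic cost).


-- ===== PORT A =====
-- while i * i <= n: if n % i == 0 and n // i - i >= 2: res.append(n // i - 1); i += 1
def divisorDif2OverLoop (n i : Int) (res : List Int) : List Int :=
  if i * i ≤ n then
    divisorDif2OverLoop n (i + 1)
      (if PySem.Int.mod n i = 0 ∧ PySem.Int.floordiv n i - i ≥ 2
       then res ++ [PySem.Int.floordiv n i - 1] else res)
  else res
termination_by (n + 1 - i).toNat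
decreasing_by
  have h1 : i ≤ n := by nlinarith [sq_nonneg (i - 1), mul_self_nonneg i]
  omega

def divisor_dif_2_over (n : Int) : List Int :=
  if n = 1 then []
  else divisorDif2OverLoop n 1 []

-- ===== PORT B =====
-- inner while of the factor loop: while m % p == 0: m //= p; e += 1  — returns (final m, e).
-- The fuel argument and the '2 ≤ p ∧ 1 ≤ m' conjuncts only make the recursion total
-- (callers pass fuel > m, which the proofs show is always enough)
def pullFac : Nat → Int → Int → Int × Int
  | 0, m, _ => (m, 0)
  | fuel + 1, m, p =>
    if 2 ≤ p ∧ 1 ≤ m ∧ PySem.Int.mod m p = 0 then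
      let r := pullFac fuel (PySem.Int.floordiv m p) p
      (r.1, r.2 + 1)
    else (m, 0)

-- outer factor loop: while p*p <= m: pull p's exponent if p divides m; returns (factors, residual m)
def factOuter : Nat → Int → Int → List (Int × Int) × Int
  | 0, m, _ => ([], m)
  | fuel + 1, m, p =>
    if p * p ≤ m then
      if PySem.Int.mod m p = 0 then
        let r := pullFac (m.toNat + 1) m p
        let rest := factOuter fuel r.1 (p + 1)
        ((p, r.2) :: rest.1, rest.2)
      else factOuter fuel m (p + 1)
    else ([], m)

-- one step of the divisor-building loop: divs = {d * p**k for d in divs for k in range(e+1)}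
-- (p**k with k drawn from range(e+1), so k ≥ 0: exact as p ^ k.toNat)
def divStep (s : List Int) (pe : Int × Int) : List Int :=
  PySem.Set.ofList (s.flatMap (fun d =>
    (PySem.List.pyRange 0 (pe.2 + 1) 1).map (fun k => d * pe.1 ^ k.toNat)))

def divisor_dif_2_over_alt (n : Int) : List Int :=
  if n < 1 then []
  else
    let fo := factOuter (n.toNat + 1) n 2
    let factors := if fo.2 > 1 then fo.1 ++ [(fo.2, 1)] else fo.1
    let divs := factors.foldl divStep (PySem.Set.ofList [1])
    ((PySem.List.sorted divs (fun x => x) false).filter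
        (fun d => decide (d * d ≤ n ∧ PySem.Int.floordiv n d - d ≥ 2))).map
      (fun d => PySem.Int.floordiv n d - 1)

-- ===== PRECONDITION & SPEC =====
def Spec_divisor_dif_2_over (n : Int) (out : List Int) : Prop := out = divisor_dif_2_over_alt n
instance (n : Int) (out : List Int) : Decidable (Spec_divisor_dif_2_over n out) := by unfold Spec_divisor_dif_2_over; infer_instance

-- ===== CLAIM (what is proved, stated in full; the proofs are below) =====
def Claim_equal_divisor_dif_2_over : Prop := ∀ (n : Int), Dom_divisor_dif_2_over n → Spec_divisor_dif_2_over n (divisor_dif_2_over n)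

-- ===== LEMMAS AND PROOFS =====

-- the integer square root, used to phrase A's loop bound
def isq (n : Int) : Int := (Nat.sqrt n.toNat : Int)

theorem isq_sq_le (n : Int) (hn : 1 ≤ n) : isq n * isq n ≤ n := by
  have h := Nat.sqrt_le' n.toNat
  rw [pow_two] at h
  have h2 : ((Nat.sqrt n.toNat * Nat.sqrt n.toNat : Nat) : Int) ≤ ((n.toNat : Nat) : Int) := by
    exact_mod_cast h
  simpa [isq, Int.toNat_of_nonneg (by omega : (0:Int) ≤ n)] using h2

theorem lt_isq_succ_sq (n : Int) (hn : 1 ≤ n) : n < (isq n + 1) * (isq n + 1) := by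
  have h := Nat.lt_succ_sqrt' n.toNat
  rw [Nat.succ_eq_add_one, pow_two] at h
  have h2 : ((n.toNat : Nat) : Int) < (((Nat.sqrt n.toNat + 1) * (Nat.sqrt n.toNat + 1) : Nat) : Int) := by
    exact_mod_cast h
  simpa [isq, Int.toNat_of_nonneg (by omega : (0:Int) ≤ n)] using h2

theorem isq_pos (n : Int) (hn : 1 ≤ n) : 1 ≤ isq n := by
  have h1 : 0 < Nat.sqrt n.toNat := Nat.sqrt_pos.mpr (by omega)
  simp [isq] at *; exact_mod_cast h1

-- the guard i*i ≤ n is exactly i ≤ isq n (for i ≥ 1)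
theorem guard_iff (n i : Int) (hn : 1 ≤ n) (hi : 1 ≤ i) : i * i ≤ n ↔ i ≤ isq n := by
  have h1 := lt_isq_succ_sq n hn
  have h2 := isq_sq_le n hn
  have h3 := isq_pos n hn
  constructor
  · intro h
    by_contra hc
    rw [not_le] at hc
    nlinarith [mul_self_le_mul_self (by omega : (0:Int) ≤ isq n + 1) (by omega : isq n + 1 ≤ i)]
  · intro h
    nlinarith [mul_self_le_mul_self (by omega : (0:Int) ≤ i) h]

-- A's loop produces the filtered/mapped ascending range
theorem loop_eq (n s : Int) (hgu : ∀ i : Int, 1 ≤ i → (i * i ≤ n ↔ i ≤ s)) :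
    ∀ (k : Nat) (i : Int) (res : List Int), 1 ≤ i → (s + 1 - i).toNat ≤ k →
      divisorDif2OverLoop n i res = res ++
        ((PySem.List.pyRange i (s + 1) 1).filter
          (fun j => decide (PySem.Int.mod n j = 0 ∧ PySem.Int.floordiv n j - j ≥ 2))).map
          (fun j => PySem.Int.floordiv n j - 1) := by
  intro k
  induction k with
  | zero =>
      intro i res hi hk
      rw [divisorDif2OverLoop, if_neg (by rw [hgu i hi]; omega),
          PySem.List.pyRange_one_eq_nil (by omega)]
      simp
  | succ k ih =>
      intro i res hi hk
      by_cases hle : i ≤ s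
      · have hrec := ih (i + 1)
          (if PySem.Int.mod n i = 0 ∧ PySem.Int.floordiv n i - i ≥ 2
           then res ++ [PySem.Int.floordiv n i - 1] else res) (by omega) (by omega)
        have hcons : PySem.List.pyRange i (s + 1) 1 = i :: PySem.List.pyRange (i + 1) (s + 1) 1 :=
          PySem.List.pyRange_one_cons (by omega)
        rw [divisorDif2OverLoop, if_pos ((hgu i hi).mpr hle), hrec, hcons]
        simp only [List.filter_cons]
        by_cases hc : PySem.Int.mod n i = 0 ∧ PySem.Int.floordiv n i - i ≥ 2
        · simp [hc]
        · simp [hc]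
      · rw [divisorDif2OverLoop, if_neg (by rw [hgu i hi]; omega),
          PySem.List.pyRange_one_eq_nil (by omega)]
        simp

-- ---- factorization invariants ----

def prodF (fs : List (Int × Int)) : Int := (fs.map (fun pe => pe.1 ^ pe.2.toNat)).prod

theorem pullFac_snd_nonneg (fuel : Nat) (m p : Int) : 0 ≤ (pullFac fuel m p).2 := by
  induction fuel generalizing m with
  | zero => simp [pullFac]
  | succ fuel ih =>
      rw [pullFac]
      by_cases h : 2 ≤ p ∧ 1 ≤ m ∧ PySem.Int.mod m p = 0
      · rw [if_pos h]
        have := ih (PySem.Int.floordiv m p)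
        dsimp only
        omega
      · rw [if_neg h]

theorem pullFac_spec (fuel : Nat) (m p : Int) :
    2 ≤ p → 1 ≤ m → m.toNat < fuel →
    m = (pullFac fuel m p).1 * p ^ (pullFac fuel m p).2.toNat ∧
    1 ≤ (pullFac fuel m p).1 ∧ ¬ p ∣ (pullFac fuel m p).1 ∧ 0 ≤ (pullFac fuel m p).2 := by
  induction fuel generalizing m with
  | zero => intro _ _ hf; omega
  | succ fuel ih =>
      intro hp hm hf
      rw [pullFac]
      by_cases h : 2 ≤ p ∧ 1 ≤ m ∧ PySem.Int.mod m p = 0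
      · obtain ⟨-, -, hmod⟩ := h
        rw [if_pos ⟨hp, hm, hmod⟩]
        have hdvd : p ∣ m := (PySem.Int.mod_eq_zero_iff_dvd m p).mp hmod
        have hpm : p ≤ m := Int.le_of_dvd (by omega) hdvd
        have hfd : PySem.Int.floordiv m p = m / p := PySem.Int.floordiv_eq_ediv_of_pos (by omega)
        have hmp : m / p * p = m := Int.ediv_mul_cancel hdvd
        have hq1 : 1 ≤ m / p := by
          rw [Int.le_ediv_iff_mul_le (by omega : (0:Int) < p)]; omega
        have hlt : m / p < m := by
          have h1 := Int.mul_ediv_add_emod m p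
          have h2 := Int.emod_nonneg m (by omega : p ≠ 0)
          nlinarith
        rw [hfd]
        obtain ⟨ih1, ih2, ih3, ih4⟩ := ih (m / p) hp hq1 (by omega)
        dsimp only
        refine ⟨?_, ih2, ih3, by omega⟩
        have htn : ((pullFac fuel (m / p) p).2 + 1).toNat = (pullFac fuel (m / p) p).2.toNat + 1 := by
          omega
        rw [htn, pow_succ, ← mul_assoc, ← ih1, hmp]
      · rw [if_neg h]
        refine ⟨by simp, hm, ?_, le_refl 0⟩
        intro hdvd
        exact h ⟨hp, hm, (PySem.Int.mod_eq_zero_iff_dvd m p).mpr hdvd⟩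

theorem pullFac_dvd_trans (fuel : Nat) (m p q : Int) (h : q ∣ (pullFac fuel m p).1) : q ∣ m := by
  induction fuel generalizing m with
  | zero => simpa [pullFac] using h
  | succ fuel ih =>
      rw [pullFac] at h
      by_cases hg : 2 ≤ p ∧ 1 ≤ m ∧ PySem.Int.mod m p = 0
      · rw [if_pos hg] at h
        obtain ⟨hp, hm, hmod⟩ := hg
        have hdvd : p ∣ m := (PySem.Int.mod_eq_zero_iff_dvd m p).mp hmod
        have hmp : PySem.Int.floordiv m p * p = m := by
          rw [PySem.Int.floordiv_eq_ediv_of_pos (by omega)]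
          exact Int.ediv_mul_cancel hdvd
        dsimp only at h
        exact Dvd.dvd.trans (ih _ h) ⟨p, hmp.symm⟩
      · rw [if_neg hg] at h
        simpa using h

theorem prime_of_no_small_divisor (m p : Int) (hp : 2 ≤ p) (hm : 1 ≤ m) (hdvd : p ∣ m)
    (hns : ∀ q : Int, 2 ≤ q → q < p → ¬ q ∣ m) : Prime p := by
  rw [Int.prime_iff_natAbs_prime, Nat.prime_def_lt]
  have hpN : p.natAbs = p.toNat := by omega
  refine ⟨by omega, ?_⟩
  intro k hk hkd
  by_contra hk1
  have hk0 : k ≠ 0 := by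
    rintro rfl
    have := Nat.eq_zero_of_zero_dvd hkd
    omega
  have hk2 : 2 ≤ k := by omega
  have hkp : (k : Int) ∣ p := by
    have := Int.natCast_dvd_natCast.mpr hkd
    rwa [hpN, Int.toNat_of_nonneg (by omega)] at this
  exact hns k (by exact_mod_cast hk2) (by omega) (hkp.trans hdvd)

theorem residual_prime (m p : Int) (hm : 2 ≤ m) (hp : 2 ≤ p) (hpp : m < p * p)
    (hns : ∀ q : Int, 2 ≤ q → q < p → ¬ q ∣ m) : Prime m := by
  rw [Int.prime_iff_natAbs_prime, Nat.prime_def_lt]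
  have hmN : (m.natAbs : Int) = m := by omega
  refine ⟨by omega, ?_⟩
  intro k hk hkd
  by_contra hk1
  have hk0 : k ≠ 0 := by
    rintro rfl
    have := Nat.eq_zero_of_zero_dvd hkd
    omega
  have hk2 : 2 ≤ k := by omega
  obtain ⟨c, hc⟩ := hkd
  have hc2 : 2 ≤ c := by
    rcases Nat.lt_or_ge c 2 with h | h
    · interval_cases c <;> omega
    · exact h
  have hkI : (k : Int) ∣ m := by
    rw [← hmN]; exact_mod_cast Dvd.intro c hc.symm
  have hcI : (c : Int) ∣ m := by
    rw [← hmN]; exact_mod_cast Dvd.intro_left k hc.symm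
  have hmI : ((k : Int)) * c = m := by rw [← hmN]; exact_mod_cast hc.symm
  rcases le_total (k : Int) (c : Int) with h | h
  · have hkp : (k : Int) < p := by nlinarith [Int.natCast_nonneg k, Int.natCast_nonneg c]
    exact hns k (by exact_mod_cast hk2) hkp hkI
  · have hcp : (c : Int) < p := by nlinarith [Int.natCast_nonneg k, Int.natCast_nonneg c]
    exact hns c (by exact_mod_cast hc2) hcp hcI

theorem factOuter_spec (fuel : Nat) (m p : Int) :
    1 ≤ m → 2 ≤ p → (m + 1 - p).toNat ≤ fuel → (∀ q : Int, 2 ≤ q → q < p → ¬ q ∣ m) →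
    m = (factOuter fuel m p).2 * prodF (factOuter fuel m p).1 ∧
    (∀ pe ∈ (factOuter fuel m p).1, Prime pe.1 ∧ 2 ≤ pe.1 ∧ 1 ≤ pe.2) ∧
    (1 ≤ (factOuter fuel m p).2 ∧ ((factOuter fuel m p).2 = 1 ∨ Prime (factOuter fuel m p).2)) := by
  induction fuel generalizing m p with
  | zero =>
      intro hm hp hf hns
      have hple : m + 1 ≤ p := by omega
      have hpm : m < p * p := by nlinarith
      rw [factOuter]
      refine ⟨by simp [prodF], by simp, hm, ?_⟩
      rcases lt_or_eq_of_le hm with h | h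
      · exact Or.inr (residual_prime m p (by omega) hp hpm hns)
      · exact Or.inl h.symm
  | succ fuel ih =>
      intro hm hp hf hns
      rw [factOuter]
      by_cases hpp : p * p ≤ m
      · rw [if_pos hpp]
        have hpm : p ≤ m := by nlinarith
        by_cases hmod : PySem.Int.mod m p = 0
        · rw [if_pos hmod]
          have hdvd : p ∣ m := (PySem.Int.mod_eq_zero_iff_dvd m p).mp hmod
          obtain ⟨hs1, hs2, hs3, hs4⟩ :=
            pullFac_spec (m.toNat + 1) m p hp hm (by omega)
          have hr1m : (pullFac (m.toNat + 1) m p).1 ≤ m := by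
            have hpow : (1:Int) ≤ p ^ (pullFac (m.toNat + 1) m p).2.toNat :=
              one_le_pow₀ (by omega : (1:Int) ≤ p)
            nlinarith
          have hsnd : 1 ≤ (pullFac (m.toNat + 1) m p).2 := by
            rw [pullFac, if_pos ⟨hp, hm, hmod⟩]
            have := pullFac_snd_nonneg m.toNat (PySem.Int.floordiv m p) p
            dsimp only
            omega
          have hns' : ∀ q : Int, 2 ≤ q → q < p + 1 → ¬ q ∣ (pullFac (m.toNat + 1) m p).1 := by
            intro q hq2 hqp hqd
            rcases lt_or_eq_of_le (by omega : q ≤ p) with h | h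
            · exact hns q hq2 h (pullFac_dvd_trans (m.toNat + 1) m p q hqd)
            · rw [h] at hqd; exact hs3 hqd
          obtain ⟨ih1, ih2, ih3⟩ := ih (pullFac (m.toNat + 1) m p).1 (p + 1) hs2
            (by omega) (by omega) hns'
          have hprime : Prime p := prime_of_no_small_divisor m p hp hm hdvd hns
          dsimp only
          refine ⟨?_, ?_, ih3⟩
          · have hpc : prodF ((p, (pullFac (m.toNat + 1) m p).2) ::
                (factOuter fuel (pullFac (m.toNat + 1) m p).1 (p + 1)).1) =
                p ^ (pullFac (m.toNat + 1) m p).2.toNat *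
                prodF (factOuter fuel (pullFac (m.toNat + 1) m p).1 (p + 1)).1 := by
              simp [prodF]
            rw [hpc]
            calc m = (pullFac (m.toNat + 1) m p).1 * p ^ (pullFac (m.toNat + 1) m p).2.toNat :=
                hs1
              _ = (factOuter fuel (pullFac (m.toNat + 1) m p).1 (p + 1)).2 *
                  prodF (factOuter fuel (pullFac (m.toNat + 1) m p).1 (p + 1)).1 *
                  p ^ (pullFac (m.toNat + 1) m p).2.toNat := by rw [← ih1]
              _ = _ := by ring
          · intro pe hpe
            rcases List.mem_cons.mp hpe with h | h
            · rw [h]; exact ⟨hprime, hp, hsnd⟩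
            · exact ih2 pe h
        · rw [if_neg hmod]
          refine ih m (p + 1) hm (by omega) (by omega) ?_
          intro q hq2 hqp hqd
          rcases lt_or_eq_of_le (by omega : q ≤ p) with h | h
          · exact hns q hq2 h hqd
          · rw [h] at hqd
            exact hmod ((PySem.Int.mod_eq_zero_iff_dvd m p).mpr hqd)
      · rw [if_neg hpp]
        refine ⟨by simp [prodF], by simp, hm, ?_⟩
        rcases lt_or_eq_of_le hm with h | h
        · exact Or.inr (residual_prime m p (by omega) hp (by omega) hns)
        · exact Or.inl h.symm

theorem mem_divStep (s : List Int) (p e x : Int) (he : 0 ≤ e) :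
    x ∈ divStep s (p, e) ↔ ∃ d ∈ s, ∃ k : Nat, (k : Int) ≤ e ∧ x = d * p ^ k := by
  unfold divStep
  rw [PySem.Set.mem_ofList, List.mem_flatMap]
  constructor
  · rintro ⟨d, hd, hx⟩
    rw [List.mem_map] at hx
    obtain ⟨k, hk, hxe⟩ := hx
    rw [PySem.List.mem_pyRange_one] at hk
    exact ⟨d, hd, k.toNat, by omega, by rw [← hxe]⟩
  · rintro ⟨d, hd, k, hk, hxe⟩
    refine ⟨d, hd, ?_⟩
    rw [List.mem_map]
    refine ⟨(k : Int), ?_, by rw [hxe]; norm_num⟩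
    rw [PySem.List.mem_pyRange_one]
    omega

theorem key_step (A p e x : Int) (hA : 1 ≤ A) (hp : 2 ≤ p) (hpr : Prime p) (he : 0 ≤ e) :
    (1 ≤ x ∧ x ∣ A * p ^ e.toNat) ↔
      ∃ d, (1 ≤ d ∧ d ∣ A) ∧ ∃ k : Nat, (k : Int) ≤ e ∧ x = d * p ^ k := by
  have hpN : Nat.Prime p.toNat := by
    have := Int.prime_iff_natAbs_prime.mp hpr
    rwa [(by omega : p.natAbs = p.toNat)] at this
  have hpc : ((p.toNat : Int)) = p := by omega
  constructor
  · rintro ⟨hx1, hxd⟩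
    have hxN : x.toNat ∣ A.toNat * p.toNat ^ e.toNat := by
      have h1 := Int.natAbs_dvd_natAbs.mpr hxd
      rwa [Int.natAbs_mul, Int.natAbs_pow,
        (by omega : x.natAbs = x.toNat), (by omega : A.natAbs = A.toNat),
        (by omega : p.natAbs = p.toNat)] at h1
    obtain ⟨a, b, ha, hb, hab⟩ := exists_dvd_and_dvd_of_dvd_mul hxN
    obtain ⟨k, hk, hbk⟩ := (Nat.dvd_prime_pow hpN).mp hb
    have ha0 : a ≠ 0 := by
      rintro rfl
      have := Nat.eq_zero_of_zero_dvd ha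
      omega
    refine ⟨(a : Int), ⟨by exact_mod_cast Nat.one_le_iff_ne_zero.mpr ha0, ?_⟩, k, by omega, ?_⟩
    · have : ((a : Int)) ∣ (A.toNat : Int) := Int.natCast_dvd_natCast.mpr ha
      rwa [(by omega : ((A.toNat : Int)) = A)] at this
    · have : x = ((a * b : Nat) : Int) := by
        rw [← hab]; omega
      rw [this, hbk]
      push_cast [hpc]
      ring
  · rintro ⟨d, ⟨hd1, hdA⟩, k, hk, hxe⟩
    have hpk : (0:Int) < p ^ k := pow_pos (by omega) k
    constructor
    · rw [hxe]; nlinarith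
    · rw [hxe]
      exact mul_dvd_mul hdA (pow_dvd_pow p (by omega))

theorem gen_mem (fs : List (Int × Int)) :
    (∀ pe ∈ fs, Prime pe.1 ∧ 2 ≤ pe.1 ∧ 0 ≤ pe.2) →
    ∀ (s : List Int) (A : Int), 1 ≤ A → (∀ x, x ∈ s ↔ 1 ≤ x ∧ x ∣ A) →
    ∀ x, x ∈ fs.foldl divStep s ↔ 1 ≤ x ∧ x ∣ A * prodF fs := by
  induction fs with
  | nil =>
      intro _ s A hA hs x
      simp only [List.foldl_nil, prodF, List.map_nil, List.prod_nil, mul_one]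
      exact hs x
  | cons pe fs ih =>
      intro hall s A hA hs x
      obtain ⟨p, e⟩ := pe
      obtain ⟨hpr, hp2, he0⟩ := hall (p, e) List.mem_cons_self
      rw [List.foldl_cons]
      have hA' : 1 ≤ A * p ^ e.toNat := by
        have := pow_pos (by omega : (0:Int) < p) e.toNat
        nlinarith
      have hs' : ∀ y, y ∈ divStep s (p, e) ↔ 1 ≤ y ∧ y ∣ A * p ^ e.toNat := by
        intro y
        rw [mem_divStep s p e y he0, key_step A p e y hA hp2 hpr he0]
        exact exists_congr fun d => and_congr_left' (hs d)
      rw [ih (fun q hq => hall q (List.mem_cons_of_mem _ hq)) (divStep s (p, e))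
        (A * p ^ e.toNat) hA' hs' x]
      have : A * p ^ e.toNat * prodF fs = A * prodF ((p, e) :: fs) := by
        simp only [prodF, List.map_cons, List.prod_cons]; ring
      rw [this]

theorem gen_ofList (fs : List (Int × Int)) :
    ∀ s : List Int, (∃ ys, s = PySem.Set.ofList ys) →
    ∃ ys, fs.foldl divStep s = PySem.Set.ofList ys := by
  induction fs with
  | nil => intro s hs; simpa using hs
  | cons pe fs ih =>
      intro s hs
      rw [List.foldl_cons]
      exact ih _ ⟨_, rfl⟩
theorem divisor_dif_2_over_spec : Claim_equal_divisor_dif_2_over := by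
  intro n _
  unfold Spec_divisor_dif_2_over divisor_dif_2_over divisor_dif_2_over_alt
  by_cases hn1 : n < 1
  · rw [if_neg (by omega), if_pos hn1, divisorDif2OverLoop, if_neg (by nlinarith)]
  · have hn : 1 ≤ n := by omega
    by_cases hone : n = 1
    · subst hone; rw [if_pos rfl]; decide
    · rw [if_neg hone, if_neg (by omega)]
      have hA := loop_eq n (isq n) (fun i hi => guard_iff n i hn hi)
        (isq n + 1 - 1).toNat 1 [] (by omega) (by omega)
      rw [hA]
      simp only [List.nil_append]
      obtain ⟨hfs1, hfs2, hfs3⟩ := factOuter_spec (n.toNat + 1) n 2 hn (le_refl 2)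
        (by omega) (by intro q h1 h2 _; omega)
      set fo := factOuter (n.toNat + 1) n 2 with hfo
      set FL := (if fo.2 > 1 then fo.1 ++ [(fo.2, 1)] else fo.1) with hFL
      have hprod : prodF FL = n := by
        rw [hFL]
        by_cases h2 : fo.2 > 1
        · rw [if_pos h2]
          have : prodF (fo.1 ++ [(fo.2, 1)]) = prodF fo.1 * fo.2 := by
            simp [prodF]
          rw [this, hfs1]; ring
        · rw [if_neg h2]
          have h1 : fo.2 = 1 := by omega
          rw [hfs1, h1, one_mul]
      have hall : ∀ pe ∈ FL, Prime pe.1 ∧ 2 ≤ pe.1 ∧ 0 ≤ pe.2 := by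
        intro pe hpe
        rw [hFL] at hpe
        by_cases h2 : fo.2 > 1
        · rw [if_pos h2] at hpe
          rcases List.mem_append.mp hpe with h | h
          · obtain ⟨a, b, c⟩ := hfs2 pe h; exact ⟨a, b, by omega⟩
          · rw [List.mem_singleton] at h
            rcases hfs3.2 with he | he
            · omega
            · rw [h]; exact ⟨he, by omega, by norm_num⟩
        · rw [if_neg h2] at hpe
          obtain ⟨a, b, c⟩ := hfs2 pe hpe; exact ⟨a, b, by omega⟩
      have hs0 : ∀ x : Int, x ∈ PySem.Set.ofList [1] ↔ 1 ≤ x ∧ x ∣ 1 := by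
        intro x
        rw [PySem.Set.mem_ofList, List.mem_singleton]
        constructor
        · rintro rfl; exact ⟨le_refl 1, dvd_refl 1⟩
        · rintro ⟨h1, hdvd⟩
          have := Int.le_of_dvd one_pos hdvd
          omega
      have hmem : ∀ x, x ∈ FL.foldl divStep (PySem.Set.ofList [1]) ↔ 1 ≤ x ∧ x ∣ n := by
        intro x
        rw [gen_mem FL hall (PySem.Set.ofList [1]) 1 (le_refl 1) hs0 x, one_mul, hprod]
      have hpwB : (PySem.List.sorted (FL.foldl divStep (PySem.Set.ofList [1]))
          (fun x => x) false).Pairwise (· < ·) := by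
        obtain ⟨ys, hys⟩ := gen_ofList FL (PySem.Set.ofList [1]) ⟨[1], rfl⟩
        rw [hys]
        exact PySem.List.sorted_ofList_pairwise_lt ys
      have hpwA : ((PySem.List.pyRange 1 (isq n + 1) 1).filter
          (fun j => decide (PySem.Int.mod n j = 0 ∧ PySem.Int.floordiv n j - j ≥ 2))).Pairwise
          (· < ·) := List.Pairwise.filter _ (PySem.List.pairwise_lt_pyRange_one 1 (isq n + 1))
      have hfil : ((PySem.List.pyRange 1 (isq n + 1) 1).filter
            (fun j => decide (PySem.Int.mod n j = 0 ∧ PySem.Int.floordiv n j - j ≥ 2))) =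
          ((PySem.List.sorted (FL.foldl divStep (PySem.Set.ofList [1])) (fun x => x) false).filter
            (fun d => decide (d * d ≤ n ∧ PySem.Int.floordiv n d - d ≥ 2))) := by
        have hpwB' := List.Pairwise.filter
          (fun d => decide (d * d ≤ n ∧ PySem.Int.floordiv n d - d ≥ 2)) hpwB
        refine ((List.perm_ext_iff_of_nodup
          (hpwA.imp ne_of_lt) (hpwB'.imp ne_of_lt)).2 ?_).eq_of_pairwise
          (fun a b _ _ h h' => absurd h' (lt_asymm h)) hpwA hpwB'
        intro x
        rw [List.mem_filter, List.mem_filter, PySem.List.mem_pyRange_one,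
          PySem.List.mem_sorted, hmem x, decide_eq_true_iff, decide_eq_true_iff,
          PySem.Int.mod_eq_zero_iff_dvd]
        constructor
        · rintro ⟨⟨hx1, hxs⟩, hdvd, hcond⟩
          exact ⟨⟨hx1, hdvd⟩, ((guard_iff n x hn hx1).2 (by omega)), hcond⟩
        · rintro ⟨⟨hx1, hdvd⟩, hsq, hcond⟩
          have := (guard_iff n x hn hx1).1 hsq
          exact ⟨⟨hx1, by omega⟩, hdvd, hcond⟩
      rw [hfil]
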